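-- pv_equiv track=rewrite | github.com/moolean/DeepResearch | inference/react_agent.py | omit_old_tool_responses
-- ===== SOURCE A (Python) =====
-- from typing import Dict, Iterator, List, Literal, Optional, Tuple, Union
--
-- OBS_START = '<tool_response>'
--
-- def omit_old_tool_responses(messages: List[dict], keep_rounds: int) -> List[dict]:
--     """
--     Replace tool response content in messages older than K rounds with a placeholder.
--
--     Args:
--         messages: List of message dictionaries
--         keep_rounds: Number of recent rounds to keep full tool responses for
--
--     Returns:
--         Modified list of messages with old tool responses omitted
--     """
--     if keep_rounds <= 0:
--         return messages
--
--     # Create a deep copy to avoid modifying the original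
--     messages_copy = []
--     for msg in messages:
--         messages_copy.append(msg.copy())
--
--     # Find all tool response messages (role="tool" or role="user" with tool_response tags)
--     tool_response_indices = []
--     for i, msg in enumerate(messages_copy):
--         if msg.get("role") == "tool":
--             tool_response_indices.append(i)
--         elif msg.get("role") == "user" and OBS_START in msg.get("content", ""):
--             tool_response_indices.append(i)
--
--     # Calculate how many tool responses to omit (all except the last keep_rounds)
--     num_to_omit = max(0, len(tool_response_indices) - keep_rounds)
--
--     # Replace content of old tool responses
--     for i in range(num_to_omit):
--         idx = tool_response_indices[i]
--         msg = messages_copy[idx]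
--
--         if msg.get("role") == "tool":
--             # For role="tool" messages, replace the content
--             messages_copy[idx]["content"] = "<tool_response>\ntool response omitted\n</tool_response>"
--         elif msg.get("role") == "user":
--             # For role="user" with tool_response tags, replace the content
--             messages_copy[idx]["content"] = "<tool_response>\ntool response omitted\n</tool_response>"
--
--     return messages_copy
-- ===== SOURCE B (Python) =====
-- OBS_START = '<tool_response>'
--
-- _PLACEHOLDER = "<tool_response>\ntool response omitted\n</tool_response>"
--
--
-- def _is_tool_response(msg):
--     role = msg.get("role")
--     return role == "tool" or (role == "user" and OBS_START in msg.get("content", ""))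
--
--
-- def omit_old_tool_responses(messages, keep_rounds):
--     if keep_rounds <= 0:
--         return messages
--     result = [msg.copy() for msg in messages]
--     # Single reverse pass: count tool responses from the end; once more than
--     # keep_rounds have been seen, blank the content.  No index list, no offset.
--     seen = 0
--     for msg in reversed(result):
--         if _is_tool_response(msg):
--             seen += 1
--             if seen > keep_rounds:
--                 msg["content"] = _PLACEHOLDER
--     return result
-- ===== Notes on version B (the rewrite author's own statement) =====
-- stated objective: simpler
-- what changed: Replaces the two-phase logic (build an index list of tool responses, compute an omit count, then loop over a range re-indexing the list) with a single reverse pass that keeps a counter of tool responses seen and blanks a message's content once the counter exceeds keep_rounds.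
import Mathlib
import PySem

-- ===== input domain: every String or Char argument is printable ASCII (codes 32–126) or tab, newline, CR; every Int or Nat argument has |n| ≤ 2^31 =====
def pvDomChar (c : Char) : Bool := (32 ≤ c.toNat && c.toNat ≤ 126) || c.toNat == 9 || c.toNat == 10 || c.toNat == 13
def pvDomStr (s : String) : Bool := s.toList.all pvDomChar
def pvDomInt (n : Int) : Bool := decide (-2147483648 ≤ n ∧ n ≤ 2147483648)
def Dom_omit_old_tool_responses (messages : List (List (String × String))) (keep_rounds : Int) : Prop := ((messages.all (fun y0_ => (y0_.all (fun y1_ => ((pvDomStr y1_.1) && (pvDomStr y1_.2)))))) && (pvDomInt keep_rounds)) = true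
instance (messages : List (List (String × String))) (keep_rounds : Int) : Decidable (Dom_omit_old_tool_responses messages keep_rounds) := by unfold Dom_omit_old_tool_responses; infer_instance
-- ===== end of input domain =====

-- B replaces A's two-phase index-list-and-offset logic by a single reverse pass with a
-- counter of tool responses seen (objective: simpler). Return-value equivalence only: like A,
-- B returns the original list unchanged (not a copy) when keep_rounds <= 0.

-- ===== PORT A =====
def omit_old_tool_responses (messages : List (List (String × String))) (keep_rounds : Int) : List (List (String × String)) :=
  if keep_rounds ≤ 0 then messages
  else
    let messages_copy := messages.foldl (fun acc msg => acc ++ [msg]) []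
    let tool_response_indices : List Int :=
      (PySem.List.enumerate messages_copy).foldl (fun acc p =>
        if (PySem.Dict.mk p.2).get? "role" == some "tool" then acc ++ [p.1]
        else if ((PySem.Dict.mk p.2).get? "role" == some "user"
                  && PySem.Str.isIn "<tool_response>" ((PySem.Dict.mk p.2).getD "content" "")) then acc ++ [p.1]
        else acc) []
    let num_to_omit : Int := max 0 ((tool_response_indices.length : Int) - keep_rounds)
    -- every index read/written below is in range, so the total forms pyGetD/pySetD are exact here
    (PySem.List.pyRange 0 num_to_omit 1).foldl (fun mc i =>
      let idx := PySem.List.pyGetD tool_response_indices i 0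
      let msg := PySem.List.pyGetD mc idx []
      if (PySem.Dict.mk msg).get? "role" == some "tool" then
        PySem.List.pySetD mc idx ((PySem.Dict.mk msg).insert "content" "<tool_response>\ntool response omitted\n</tool_response>").items
      else if (PySem.Dict.mk msg).get? "role" == some "user" then
        PySem.List.pySetD mc idx ((PySem.Dict.mk msg).insert "content" "<tool_response>\ntool response omitted\n</tool_response>").items
      else mc) messages_copy

-- ===== PORT B =====
def pvIsToolResp (msg : List (String × String)) : Bool :=
  (PySem.Dict.mk msg).get? "role" == some "tool"
  || ((PySem.Dict.mk msg).get? "role" == some "user"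
       && PySem.Str.isIn "<tool_response>" ((PySem.Dict.mk msg).getD "content" ""))

-- the reverse pass of Source B: process the tail first, return (tool responses seen, rewritten list)
def pvOmitGo (keep_rounds : Int) : List (List (String × String)) → Int × List (List (String × String))
  | [] => (0, [])
  | msg :: rest =>
    let r := pvOmitGo keep_rounds rest
    if pvIsToolResp msg then
      (r.1 + 1,
        (if keep_rounds < r.1 + 1 then
          ((PySem.Dict.mk msg).insert "content" "<tool_response>\ntool response omitted\n</tool_response>").items
         else msg) :: r.2)
    else (r.1, msg :: r.2)

def omit_old_tool_responses_alt (messages : List (List (String × String))) (keep_rounds : Int) : List (List (String × String)) :=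
  if keep_rounds ≤ 0 then messages
  else (pvOmitGo keep_rounds messages).2

-- ===== PRECONDITION & SPEC =====
def Spec_omit_old_tool_responses (messages : List (List (String × String))) (keep_rounds : Int) (out : List (List (String × String))) : Prop := out = omit_old_tool_responses_alt messages keep_rounds
instance (messages : List (List (String × String))) (keep_rounds : Int) (out : List (List (String × String))) : Decidable (Spec_omit_old_tool_responses messages keep_rounds out) := by unfold Spec_omit_old_tool_responses; infer_instance

-- ===== CLAIM (what is proved, stated in full; the proofs are below) =====
def Claim_equal_omit_old_tool_responses : Prop := ∀ (messages : List (List (String × String))) (keep_rounds : Int), Dom_omit_old_tool_responses messages keep_rounds → Spec_omit_old_tool_responses messages keep_rounds (omit_old_tool_responses messages keep_rounds)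

-- ===== LEMMAS AND PROOFS =====

-- the placeholder write A performs at one index
def pvMarkMsg (msg : List (String × String)) : List (String × String) :=
  ((PySem.Dict.mk msg).insert "content" "<tool_response>\ntool response omitted\n</tool_response>").items

-- the body of A's final update loop, as a function of the list and the index
def pvBody (mc : List (List (String × String))) (idx : Int) : List (List (String × String)) :=
  let msg := PySem.List.pyGetD mc idx []
  if (PySem.Dict.mk msg).get? "role" == some "tool" then
    PySem.List.pySetD mc idx (pvMarkMsg msg)
  else if (PySem.Dict.mk msg).get? "role" == some "user" then
    PySem.List.pySetD mc idx (pvMarkMsg msg)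
  else mc

-- A's tool_response_indices, in closed form
def pvIdxs (l : List (List (String × String))) : List Int :=
  ((PySem.List.enumerate l).filter (fun p => pvIsToolResp p.2)).map (·.1)

lemma pvIdxFold (e : List (Int × List (String × String))) (acc : List Int) :
    e.foldl (fun acc p =>
        if (PySem.Dict.mk p.2).get? "role" == some "tool" then acc ++ [p.1]
        else if ((PySem.Dict.mk p.2).get? "role" == some "user"
                  && PySem.Str.isIn "<tool_response>" ((PySem.Dict.mk p.2).getD "content" "")) then acc ++ [p.1]
        else acc) acc
      = acc ++ (e.filter (fun p => pvIsToolResp p.2)).map (·.1) := by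
  induction e generalizing acc with
  | nil => simp
  | cons p e ih =>
    rw [List.foldl_cons, List.filter_cons]
    have hp : pvIsToolResp p.2
        = ((PySem.Dict.mk p.2).get? "role" == some "tool"
           || ((PySem.Dict.mk p.2).get? "role" == some "user"
               && PySem.Str.isIn "<tool_response>" ((PySem.Dict.mk p.2).getD "content" ""))) := rfl
    cases h1 : ((PySem.Dict.mk p.2).get? "role" == some "tool")
    · cases h2 : ((PySem.Dict.mk p.2).get? "role" == some "user"
                  && PySem.Str.isIn "<tool_response>" ((PySem.Dict.mk p.2).getD "content" ""))
      · have hf : pvIsToolResp p.2 = false := by rw [hp, h1, h2]; rfl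
        rw [if_neg (by simp), if_neg (by simp), ih, hf]
        simp
      · have ht : pvIsToolResp p.2 = true := by rw [hp, h1, h2]; rfl
        rw [if_neg (by simp), if_pos rfl, ih, ht]
        simp
    · have ht : pvIsToolResp p.2 = true := by rw [hp, h1]; rfl
      rw [if_pos rfl, ih, ht]
      simp

lemma pvEnumShift (xs : List (List (String × String))) (s : Int) :
    PySem.List.enumerate xs s = (PySem.List.enumerate xs 0).map (fun p => (p.1 + s, p.2)) := by
  induction xs generalizing s with
  | nil => simp [PySem.List.enumerate_nil]
  | cons x xs ih =>
    rw [PySem.List.enumerate_cons, PySem.List.enumerate_cons]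
    simp only [zero_add]
    rw [ih (s + 1), ih 1]
    simp only [List.map_cons, List.map_map, zero_add]
    congr 1
    apply List.map_congr_left
    intro p _
    simp only [Function.comp]
    congr 1
    ring

lemma pvIdxs_cons (m : List (String × String)) (rest : List (List (String × String))) :
    pvIdxs (m :: rest)
      = (if pvIsToolResp m then [(0 : Int)] else []) ++ (pvIdxs rest).map (· + 1) := by
  unfold pvIdxs
  rw [PySem.List.enumerate_cons]
  simp only [zero_add]
  rw [pvEnumShift rest 1]
  rw [List.filter_cons]
  cases h : pvIsToolResp m <;>
    simp [h, List.filter_map, List.map_map, Function.comp] <;> rfl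

lemma pvIdxs_nonneg (l : List (List (String × String))) : ∀ i ∈ pvIdxs l, 0 ≤ i := by
  induction l with
  | nil => simp [pvIdxs, PySem.List.enumerate_nil]
  | cons m rest ih =>
    intro i hi
    rw [pvIdxs_cons] at hi
    rcases List.mem_append.1 hi with h | h
    · cases hm : pvIsToolResp m <;> simp [hm] at h; omega
    · rcases List.mem_map.1 h with ⟨j, hj, rfl⟩
      have := ih j hj; omega

lemma pvIdxs_length (l : List (List (String × String))) :
    (pvIdxs l).length = l.countP pvIsToolResp := by
  induction l with
  | nil => simp [pvIdxs, PySem.List.enumerate_nil]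
  | cons m rest ih =>
    rw [pvIdxs_cons, List.countP_cons]
    cases hm : pvIsToolResp m <;> simp [hm, ih]

lemma pvRangeFold (f : List (List (String × String)) → Int → List (List (String × String))) :
    ∀ (t : Nat) (inds : List Int) (init : List (List (String × String))), t ≤ inds.length →
      (PySem.List.pyRange 0 (t : Int) 1).foldl (fun mc i => f mc (PySem.List.pyGetD inds i 0)) init
        = (inds.take t).foldl f init := by
  intro t
  induction t with
  | zero => intro inds init _; simp [PySem.List.pyRange_zero_nat]
  | succ t ih =>
    intro inds init ht
    have h1 : ((t : Int) + 1) = ((t + 1 : Nat) : Int) := by push_cast; ring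
    rw [← h1, PySem.List.pyRange_one_succ_right (by positivity)]
    rw [List.foldl_append]
    rw [ih inds init (by omega)]
    have hlt : t < inds.length := by omega
    have hget : PySem.List.pyGetD inds (t : Int) 0 = inds[t] := by
      rw [PySem.List.pyGetD_natCast]
      simp [List.getD, hlt]
    have htake : inds.take (t + 1) = inds.take t ++ [inds[t]] := by
      rw [List.take_succ]
      simp [List.getElem?_eq_getElem hlt]
    rw [htake, List.foldl_append]
    simp [hget]

lemma pvOmitGo_fst (k : Int) (l : List (List (String × String))) :
    (pvOmitGo k l).1 = (l.countP pvIsToolResp : Int) := by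
  induction l with
  | nil => simp [pvOmitGo]
  | cons m rest ih =>
    rw [pvOmitGo, List.countP_cons]
    cases hm : pvIsToolResp m <;> simp [hm, ih]

lemma pvOmitGo_snd_of_le (k : Int) (l : List (List (String × String)))
    (h : (l.countP pvIsToolResp : Int) ≤ k) : (pvOmitGo k l).2 = l := by
  induction l with
  | nil => simp [pvOmitGo]
  | cons m rest ih =>
    rw [List.countP_cons] at h
    have hrest : (rest.countP pvIsToolResp : Int) ≤ k := by
      cases hm : pvIsToolResp m <;> simp [hm] at h <;> push_cast at h ⊢ <;> omega
    rw [pvOmitGo]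
    cases hm : pvIsToolResp m
    · simp [hm, ih hrest]
    · have hk : ¬ k < (pvOmitGo k rest).1 + 1 := by
        rw [pvOmitGo_fst]
        simp [hm] at h
        push_cast at h ⊢
        omega
      simp [hm, hk, ih hrest]

lemma pvBody_zero (m : List (String × String)) (rest : List (List (String × String)))
    (h : pvIsToolResp m = true) : pvBody (m :: rest) 0 = pvMarkMsg m :: rest := by
  unfold pvBody
  have hget : PySem.List.pyGetD (m :: rest) (0 : Int) [] = m := by
    rw [PySem.List.pyGetD_of_nonneg _ _ le_rfl]; rfl
  rw [hget]
  have hset : PySem.List.pySetD (m :: rest) (0 : Int) (pvMarkMsg m) = pvMarkMsg m :: rest := by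
    rw [PySem.List.pySetD_of_nonneg _ _ le_rfl]; rfl
  unfold pvIsToolResp at h
  cases h1 : ((PySem.Dict.mk m).get? "role" == some "tool")
  · rw [h1] at h
    simp only [Bool.false_or, Bool.and_eq_true] at h
    simp [h1, h.1, hset]
  · simp [h1, hset]

lemma pvBody_succ (m : List (String × String)) (rest : List (List (String × String)))
    (i : Int) (hi : 0 ≤ i) : pvBody (m :: rest) (i + 1) = m :: pvBody rest i := by
  unfold pvBody
  have hget : PySem.List.pyGetD (m :: rest) (i + 1) [] = PySem.List.pyGetD rest i [] := by
    rw [PySem.List.pyGetD_of_nonneg _ _ (by omega), PySem.List.pyGetD_of_nonneg _ _ hi]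
    have h : (i + 1).toNat = i.toNat + 1 := by omega
    rw [h, List.getD_cons_succ]
  have hset : ∀ v, PySem.List.pySetD (m :: rest) (i + 1) v = m :: PySem.List.pySetD rest i v := by
    intro v
    rw [PySem.List.pySetD_of_nonneg _ _ (by omega), PySem.List.pySetD_of_nonneg _ _ hi]
    have h : (i + 1).toNat = i.toNat + 1 := by omega
    rw [h, List.set_cons_succ]
  rw [hget]
  cases h1 : ((PySem.Dict.mk (PySem.List.pyGetD rest i [])).get? "role" == some "tool") <;>
    cases h2 : ((PySem.Dict.mk (PySem.List.pyGetD rest i [])).get? "role" == some "user") <;>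
    simp [h1, h2, hset]

lemma pvFoldShift (idxlist : List Int) :
    ∀ (hnn : ∀ i ∈ idxlist, 0 ≤ i) (hd : List (String × String)) (rest : List (List (String × String))),
      (idxlist.map (· + 1)).foldl pvBody (hd :: rest) = hd :: idxlist.foldl pvBody rest := by
  induction idxlist with
  | nil => intro _ hd rest; simp
  | cons i idxlist ih =>
    intro hnn hd rest
    simp only [List.map_cons, List.foldl_cons]
    rw [pvBody_succ hd rest i (hnn i (by simp))]
    exact ih (fun j hj => hnn j (by simp [hj])) hd (pvBody rest i)

lemma pvA_unfold (messages : List (List (String × String))) (keep_rounds : Int)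
    (hk : ¬ keep_rounds ≤ 0) :
    omit_old_tool_responses messages keep_rounds
      = (PySem.List.pyRange 0 (max 0 (((pvIdxs messages).length : Int) - keep_rounds)) 1).foldl
          (fun mc i => pvBody mc (PySem.List.pyGetD (pvIdxs messages) i 0)) messages := by
  unfold omit_old_tool_responses
  rw [if_neg hk]
  simp only [PySem.List.foldl_append_singleton_eq_self, List.nil_append, pvIdxFold,
    pvBody, pvIdxs, pvMarkMsg]

lemma pvMain (k : Int) (hk : 1 ≤ k) (l : List (List (String × String))) :
    ((pvIdxs l).take (l.countP pvIsToolResp - k.toNat)).foldl pvBody l = (pvOmitGo k l).2 := by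
  induction l with
  | nil => simp [pvIdxs, PySem.List.enumerate_nil, pvOmitGo]
  | cons m rest ih =>
    rw [pvIdxs_cons, List.countP_cons, pvOmitGo]
    cases hm : pvIsToolResp m
    · -- head is not a tool response
      simp only [hm, Bool.false_eq_true, if_false, List.nil_append, add_zero]
      rw [← List.map_take]
      rw [pvFoldShift _ (fun j hj => pvIdxs_nonneg rest j (List.take_subset _ _ hj)) m rest]
      rw [ih]
    · -- head is a tool response
      simp only [hm, if_true]
      by_cases hc : rest.countP pvIsToolResp + 1 ≤ k.toNat
      · -- nothing is omitted
        have h0 : rest.countP pvIsToolResp + 1 - k.toNat = 0 := by omega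
        rw [h0]
        simp only [List.take_zero, List.foldl_nil]
        have hcnt : ((m :: rest).countP pvIsToolResp : Int) ≤ k := by
          rw [List.countP_cons]; simp [hm]; omega
        have := pvOmitGo_snd_of_le k (m :: rest) hcnt
        rw [pvOmitGo] at this
        simp only [hm, if_true] at this
        exact this.symm
      · -- the head (and the first tool responses of the tail) are omitted
        have hs : rest.countP pvIsToolResp + 1 - k.toNat = (rest.countP pvIsToolResp - k.toNat) + 1 := by
          omega
        rw [hs]
        simp only [List.singleton_append, List.take_succ_cons, List.foldl_cons]
        rw [pvBody_zero m rest hm]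
        rw [← List.map_take]
        rw [pvFoldShift _ (fun j hj => pvIdxs_nonneg rest j (List.take_subset _ _ hj)) (pvMarkMsg m) rest]
        rw [ih]
        have hcond : k < (pvOmitGo k rest).1 + 1 := by
          rw [pvOmitGo_fst]; omega
        simp [hcond, pvMarkMsg]

-- ===== VERDICT (by name: the statement is the Claim_ definition above) =====
theorem omit_old_tool_responses_spec : Claim_equal_omit_old_tool_responses := by
  intro messages keep_rounds _
  unfold Spec_omit_old_tool_responses omit_old_tool_responses_alt
  by_cases hk : keep_rounds ≤ 0
  · rw [if_pos hk]
    unfold omit_old_tool_responses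
    rw [if_pos hk]
  · rw [if_neg hk, pvA_unfold messages keep_rounds hk]
    have hk1 : 1 ≤ keep_rounds := by omega
    have hnum : max 0 (((pvIdxs messages).length : Int) - keep_rounds)
        = ((messages.countP pvIsToolResp - keep_rounds.toNat : Nat) : Int) := by
      rw [pvIdxs_length]; omega
    rw [hnum, pvRangeFold pvBody _ _ _ (by rw [pvIdxs_length]; omega)]
    exact pvMain keep_rounds hk1 messages
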